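-- pv_equiv track=rewrite | github.com/DavidJArnold/AdventOfCode | 15/15.py | make_circle
-- ===== SOURCE A (Python) =====
-- def make_circle(centre, radius, range_limit):
--     # return points on the radius of a circle* with centre centre
--     # and radius radius, excluding points outside [0, range_limit]
--     #
--     # * in the taxicab metric
--
--     radius_list = range(radius)
--     perim = []
--     perim.extend((centre[0] + x, centre[1] + radius - x) for x in radius_list if centre[0] + x >= 0 and centre[1] + radius - x >= 0 and centre[0] + x <= range_limit and centre[1] + radius - x <= range_limit)
--     perim.extend((centre[0] + x, centre[1] - radius + x) for x in radius_list if centre[0] + x >= 0 and centre[1] - radius + x >= 0 and centre[0] + x <= range_limit and centre[1] - radius + x <= range_limit)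
--     perim.extend((centre[0] - x, centre[1] + radius - x) for x in radius_list if centre[0] - x >= 0 and centre[1] + radius - x >= 0 and centre[0] - x <= range_limit and centre[1] + radius - x <= range_limit)
--     perim.extend((centre[0] - x, centre[1] - radius + x) for x in radius_list if centre[0] - x >= 0 and centre[1] - radius + x >= 0 and centre[0] - x <= range_limit and centre[1] - radius + x <= range_limit)
--     return set(perim)
-- ===== SOURCE B (Python) =====
-- def make_circle(centre, radius, range_limit):
--     # Same taxicab-circle perimeter points, but per quadrant the valid x-range
--     # is computed in closed form, so only x producing in-box points are visited.
--     c0, c1 = centre[0], centre[1]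
--     perim = []
--     for s, t in ((1, 1), (1, -1), (-1, 1), (-1, -1)):
--         lo_x, hi_x = (-c0, range_limit - c0) if s == 1 else (c0 - range_limit, c0)
--         lo_y, hi_y = (c1 + radius - range_limit, c1 + radius) if t == 1 else (radius - c1, radius - c1 + range_limit)
--         lo = max(0, max(lo_x, lo_y))
--         hi = min(radius - 1, min(hi_x, hi_y))
--         perim.extend((c0 + s * x, c1 + t * (radius - x)) for x in range(lo, hi + 1))
--     return set(perim)
-- ===== Notes on version B (the rewrite author's own statement) =====
-- stated objective: faster
-- what changed: Instead of scanning all x in range(radius) and filtering each of the four quadrant generators by the box bounds, B solves the linear bound inequalities per quadrant in closed form and iterates only the valid contiguous x-interval, so work is proportional to the number of emitted points rather than to the radius (the gain is largest when the box clips most of the circle).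
-- outside the precondition, e.g. on make_circle((), 0, 5): A returns set(), B raises IndexError
import Mathlib
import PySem

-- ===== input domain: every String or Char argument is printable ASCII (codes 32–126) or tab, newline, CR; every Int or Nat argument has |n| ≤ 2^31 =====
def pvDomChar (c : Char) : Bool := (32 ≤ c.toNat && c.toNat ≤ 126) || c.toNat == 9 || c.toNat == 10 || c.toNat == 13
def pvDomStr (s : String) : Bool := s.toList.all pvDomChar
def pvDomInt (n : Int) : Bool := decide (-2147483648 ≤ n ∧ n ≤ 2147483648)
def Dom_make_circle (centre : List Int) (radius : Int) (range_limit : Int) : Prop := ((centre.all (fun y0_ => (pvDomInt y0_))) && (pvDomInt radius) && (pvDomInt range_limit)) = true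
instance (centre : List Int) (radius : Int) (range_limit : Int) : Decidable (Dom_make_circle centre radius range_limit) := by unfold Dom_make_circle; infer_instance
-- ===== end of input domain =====

-- B computes each quadrant's valid x-interval in closed form and iterates only it,
-- instead of filtering every x in range(radius); same returned set.


-- ===== PORT A =====
-- centre[0] / centre[1] are ported in the total form pyGetD, exact under Pre_ (2 ≤ centre.length).
def make_circle (centre : List Int) (radius : Int) (range_limit : Int) : List (List Int) :=
  let c0 := PySem.List.pyGetD centre 0 0
  let c1 := PySem.List.pyGetD centre 1 0
  let radius_list := PySem.List.pyRange 0 radius 1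
  let perim :=
    ((radius_list.filter (fun x => decide (c0 + x ≥ 0) && decide (c1 + radius - x ≥ 0) && decide (c0 + x ≤ range_limit) && decide (c1 + radius - x ≤ range_limit))).map (fun x => [c0 + x, c1 + radius - x]))
    ++ ((radius_list.filter (fun x => decide (c0 + x ≥ 0) && decide (c1 - radius + x ≥ 0) && decide (c0 + x ≤ range_limit) && decide (c1 - radius + x ≤ range_limit))).map (fun x => [c0 + x, c1 - radius + x]))
    ++ ((radius_list.filter (fun x => decide (c0 - x ≥ 0) && decide (c1 + radius - x ≥ 0) && decide (c0 - x ≤ range_limit) && decide (c1 + radius - x ≤ range_limit))).map (fun x => [c0 - x, c1 + radius - x]))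
    ++ ((radius_list.filter (fun x => decide (c0 - x ≥ 0) && decide (c1 - radius + x ≥ 0) && decide (c0 - x ≤ range_limit) && decide (c1 - radius + x ≤ range_limit))).map (fun x => [c0 - x, c1 - radius + x]))
  PySem.Set.ofList perim

-- ===== PORT B =====
-- one quadrant: the valid x form the interval [max(0,lo_x,lo_y), min(radius-1,hi_x,hi_y)]
def mc_segment (c0 c1 radius range_limit s t : Int) : List (List Int) :=
  let lox := if s = 1 then -c0 else c0 - range_limit
  let hix := if s = 1 then range_limit - c0 else c0
  let loy := if t = 1 then c1 + radius - range_limit else radius - c1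
  let hiy := if t = 1 then c1 + radius else radius - c1 + range_limit
  let lo := max 0 (max lox loy)
  let hi := min (radius - 1) (min hix hiy)
  (PySem.List.pyRange lo (hi + 1) 1).map (fun x => [c0 + s * x, c1 + t * (radius - x)])

def make_circle_alt (centre : List Int) (radius : Int) (range_limit : Int) : List (List Int) :=
  let c0 := PySem.List.pyGetD centre 0 0
  let c1 := PySem.List.pyGetD centre 1 0
  let perim := [((1 : Int), (1 : Int)), (1, -1), (-1, 1), (-1, -1)].foldl
    (fun acc st => acc ++ mc_segment c0 c1 radius range_limit st.1 st.2) []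
  PySem.Set.ofList perim

-- ===== PRECONDITION & SPEC =====
-- Pre_ excludes centres with fewer than two coordinates: A raises IndexError there whenever
-- radius > 0, and when radius ≤ 0 A only returns the empty set because its generators are
-- never forced (lazy evaluation), while B reads centre[0] up front and raises IndexError.
def Pre_make_circle (centre : List Int) (radius : Int) (range_limit : Int) : Prop :=
  2 ≤ centre.length
instance (centre : List Int) (radius : Int) (range_limit : Int) : Decidable (Pre_make_circle centre radius range_limit) := by unfold Pre_make_circle; infer_instance
def pvWitness_make_circle : List Int × Int × Int := ([3, 4], 2, 10)

def Spec_make_circle (centre : List Int) (radius : Int) (range_limit : Int) (out : List (List Int)) : Prop := out = make_circle_alt centre radius range_limit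
instance (centre : List Int) (radius : Int) (range_limit : Int) (out : List (List Int)) : Decidable (Spec_make_circle centre radius range_limit out) := by unfold Spec_make_circle; infer_instance

-- ===== CLAIM (what is proved, stated in full; the proofs are below) =====
def Claim_equal_make_circle : Prop := ∀ (centre : List Int) (radius : Int) (range_limit : Int), Dom_make_circle centre radius range_limit → Pre_make_circle centre radius range_limit → Spec_make_circle centre radius range_limit (make_circle centre radius range_limit)

-- ===== LEMMAS AND PROOFS =====

-- filtering range(a,b) by membership in [lo,hi] is the clipped range
theorem pyRange_filter_interval (lo hi a b : Int) :
    (PySem.List.pyRange a b 1).filter (fun x => decide (lo ≤ x) && decide (x ≤ hi))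
      = PySem.List.pyRange (max a lo) (min (b - 1) hi + 1) 1 := by
  by_cases hab : b ≤ a
  · rw [PySem.List.pyRange_one_eq_nil hab,
      PySem.List.pyRange_one_eq_nil (show min (b - 1) hi + 1 ≤ max a lo by omega),
      List.filter_nil]
  · rw [PySem.List.pyRange_one_cons (show a < b by omega), List.filter_cons]
    by_cases h1 : lo ≤ a ∧ a ≤ hi
    · have hd : (decide (lo ≤ a) && decide (a ≤ hi)) = true := by
        simp [h1.1, h1.2]
      rw [hd, if_pos rfl]
      rw [pyRange_filter_interval lo hi (a + 1) b,
        PySem.List.pyRange_one_cons (show max a lo < min (b - 1) hi + 1 by omega),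
        show max a lo = a by omega, show max (a + 1) lo = a + 1 by omega]
    · have hd : (decide (lo ≤ a) && decide (a ≤ hi)) = false := by
        simp only [Bool.and_eq_false_iff, decide_eq_false_iff_not]
        omega
      rw [hd, if_neg (by simp)]
      rw [pyRange_filter_interval lo hi (a + 1) b]
      rcases (by omega : a < lo ∨ hi < a) with h | h
      · rw [show max (a + 1) lo = max a lo by omega]
      · rw [PySem.List.pyRange_one_eq_nil (by omega),
          PySem.List.pyRange_one_eq_nil (by omega)]
termination_by (b - a).toNat
decreasing_by all_goals omega

theorem make_circle_spec_aux (centre : List Int) (radius : Int) (range_limit : Int) :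
    make_circle centre radius range_limit = make_circle_alt centre radius range_limit := by
  simp only [make_circle, make_circle_alt, List.foldl, List.nil_append]
  congr 1
  set c0 := PySem.List.pyGetD centre 0 0 with hc0
  set c1 := PySem.List.pyGetD centre 1 0 with hc1
  have q1 : ((PySem.List.pyRange 0 radius 1).filter (fun x => decide (c0 + x ≥ 0) && decide (c1 + radius - x ≥ 0) && decide (c0 + x ≤ range_limit) && decide (c1 + radius - x ≤ range_limit))).map (fun x => [c0 + x, c1 + radius - x])
      = mc_segment c0 c1 radius range_limit 1 1 := by
    simp only [mc_segment]
    rw [List.filter_congr (fun x _ => show _ = (decide (max (-c0) (c1 + radius - range_limit) ≤ x) && decide (x ≤ min (range_limit - c0) (c1 + radius))) by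
      rw [Bool.eq_iff_iff]; simp only [Bool.and_eq_true, decide_eq_true_eq, ge_iff_le]; omega)]
    rw [pyRange_filter_interval]
    exact List.map_congr_left (fun x _ => by simp only [List.cons.injEq, and_true]; constructor <;> ring)
  have q2 : ((PySem.List.pyRange 0 radius 1).filter (fun x => decide (c0 + x ≥ 0) && decide (c1 - radius + x ≥ 0) && decide (c0 + x ≤ range_limit) && decide (c1 - radius + x ≤ range_limit))).map (fun x => [c0 + x, c1 - radius + x])
      = mc_segment c0 c1 radius range_limit 1 (-1) := by
    simp only [mc_segment, if_neg (show ¬((-1 : Int) = 1) by decide)]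
    rw [List.filter_congr (fun x _ => show _ = (decide (max (-c0) (radius - c1) ≤ x) && decide (x ≤ min (range_limit - c0) (radius - c1 + range_limit))) by
      rw [Bool.eq_iff_iff]; simp only [Bool.and_eq_true, decide_eq_true_eq, ge_iff_le]; omega)]
    rw [pyRange_filter_interval]
    exact List.map_congr_left (fun x _ => by simp only [List.cons.injEq, and_true]; constructor <;> ring)
  have q3 : ((PySem.List.pyRange 0 radius 1).filter (fun x => decide (c0 - x ≥ 0) && decide (c1 + radius - x ≥ 0) && decide (c0 - x ≤ range_limit) && decide (c1 + radius - x ≤ range_limit))).map (fun x => [c0 - x, c1 + radius - x])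
      = mc_segment c0 c1 radius range_limit (-1) 1 := by
    simp only [mc_segment, if_neg (show ¬((-1 : Int) = 1) by decide)]
    rw [List.filter_congr (fun x _ => show _ = (decide (max (c0 - range_limit) (c1 + radius - range_limit) ≤ x) && decide (x ≤ min c0 (c1 + radius))) by
      rw [Bool.eq_iff_iff]; simp only [Bool.and_eq_true, decide_eq_true_eq, ge_iff_le]; omega)]
    rw [pyRange_filter_interval]
    exact List.map_congr_left (fun x _ => by simp only [List.cons.injEq, and_true]; constructor <;> ring)
  have q4 : ((PySem.List.pyRange 0 radius 1).filter (fun x => decide (c0 - x ≥ 0) && decide (c1 - radius + x ≥ 0) && decide (c0 - x ≤ range_limit) && decide (c1 - radius + x ≤ range_limit))).map (fun x => [c0 - x, c1 - radius + x])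
      = mc_segment c0 c1 radius range_limit (-1) (-1) := by
    simp only [mc_segment, if_neg (show ¬((-1 : Int) = 1) by decide)]
    rw [List.filter_congr (fun x _ => show _ = (decide (max (c0 - range_limit) (radius - c1) ≤ x) && decide (x ≤ min c0 (radius - c1 + range_limit))) by
      rw [Bool.eq_iff_iff]; simp only [Bool.and_eq_true, decide_eq_true_eq, ge_iff_le]; omega)]
    rw [pyRange_filter_interval]
    exact List.map_congr_left (fun x _ => by simp only [List.cons.injEq, and_true]; constructor <;> ring)
  rw [q1, q2, q3, q4]

-- ===== VERDICT (by name: the statement is the Claim_ definition above) =====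
theorem make_circle_spec : Claim_equal_make_circle := by
  intro centre radius range_limit _ _
  exact make_circle_spec_aux centre radius range_limit
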